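-- pv_equiv track=rewrite | github.com/wagonbomb/kawaiidra-mcp | src/ghidra_mcp/server.py | _quote_windows_arg
-- ===== SOURCE A (Python) =====
-- def _quote_windows_arg(arg: str) -> str:
--     """Quote an argument for Windows cmd.exe if it contains special characters."""
--     # Characters that need quoting in cmd.exe
--     special_chars = ' \t()&^|<>!'
--     if any(c in arg for c in special_chars) or '"' in arg:
--         # Escape special cmd.exe characters with ^ and wrap in double quotes
--         escaped = arg
--         for char in '^&|<>':  # Characters that need escaping even in quotes
--             escaped = escaped.replace(char, f'^{char}')
--         # Parentheses need escaping in cmd.exe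
--         escaped = escaped.replace('(', '^(').replace(')', '^)')
--         # Escape any existing double quotes
--         escaped = escaped.replace('"', '""')
--         return '"' + escaped + '"'
--     return arg
-- ===== SOURCE B (Python) =====
-- def _quote_windows_arg(arg: str) -> str:
--     """Quote an argument for Windows cmd.exe if it contains special characters."""
--     special_chars = ' \t()&^|<>!'
--     if any(c in arg for c in special_chars) or '"' in arg:
--         # single pass: per-character escape table instead of repeated .replace scans
--         parts = []
--         for c in arg:
--             if c in '^&|<>()':
--                 parts.append('^' + c)
--             elif c == '"':
--                 parts.append('""')
--             else:
--                 parts.append(c)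
--         return '"' + ''.join(parts) + '"'
--     return arg
-- ===== Notes on version B (the rewrite author's own statement) =====
-- stated objective: simpler
-- what changed: Replaces A's seven sequential .replace() scans over the whole string with a single pass that maps each character through an explicit escape table and joins the pieces once; the quoting guard is unchanged.
import Mathlib
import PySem

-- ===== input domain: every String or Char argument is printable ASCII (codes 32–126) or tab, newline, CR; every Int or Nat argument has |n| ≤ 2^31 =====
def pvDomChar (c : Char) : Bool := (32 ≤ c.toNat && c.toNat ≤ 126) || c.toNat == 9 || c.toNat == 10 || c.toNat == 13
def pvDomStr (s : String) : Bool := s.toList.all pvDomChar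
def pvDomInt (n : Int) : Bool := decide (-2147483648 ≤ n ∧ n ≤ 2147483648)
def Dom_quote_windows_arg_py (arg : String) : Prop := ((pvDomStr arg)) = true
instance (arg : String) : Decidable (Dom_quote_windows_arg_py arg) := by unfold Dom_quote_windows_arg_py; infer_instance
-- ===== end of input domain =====

-- B replaces A's seven sequential .replace scans by one per-character pass over the string
-- (objective: simpler, single traversal); the quoting guard is unchanged.

-- ===== PORT A =====
-- the guard `any(c in arg for c in special_chars) or '"' in arg` (identical in A and B)
def qaGuard (s : List Char) : Bool :=
  ([' ', '\t', '(', ')', '&', '^', '|', '<', '>', '!'].any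
    (fun c => PySem.Chars.isIn [c] s)) || PySem.Chars.isIn ['"'] s

def quote_windows_arg_py (arg : String) : String :=
  let s := arg.toList
  if qaGuard s then
    -- for char in '^&|<>': escaped = escaped.replace(char, '^' + char)
    let escaped := ['^', '&', '|', '<', '>'].foldl
      (fun e ch => PySem.Chars.replace e [ch] ['^', ch]) s
    -- escaped = escaped.replace('(', '^(').replace(')', '^)')
    let escaped := PySem.Chars.replace (PySem.Chars.replace escaped ['('] ['^', '(']) [')'] ['^', ')']
    -- escaped = escaped.replace('"', '""')
    let escaped := PySem.Chars.replace escaped ['"'] ['"', '"']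
    String.ofList ('"' :: escaped ++ ['"'])
  else arg

-- ===== PORT B =====
-- per-character escape table of Source B's single pass
def qaEsc (c : Char) : List Char :=
  if c = '^' ∨ c = '&' ∨ c = '|' ∨ c = '<' ∨ c = '>' ∨ c = '(' ∨ c = ')' then ['^', c]
  else if c = '"' then ['"', '"']
  else [c]

def quote_windows_arg_py_alt (arg : String) : String :=
  let s := arg.toList
  if qaGuard s then
    String.ofList ('"' :: s.flatMap qaEsc ++ ['"'])
  else arg

-- ===== PRECONDITION & SPEC =====
def Spec_quote_windows_arg_py (arg : String) (out : String) : Prop := out = quote_windows_arg_py_alt arg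
instance (arg : String) (out : String) : Decidable (Spec_quote_windows_arg_py arg out) := by unfold Spec_quote_windows_arg_py; infer_instance

-- ===== CLAIM (what is proved, stated in full; the proofs are below) =====
def Claim_equal_quote_windows_arg_py : Prop := ∀ (arg : String), Dom_quote_windows_arg_py arg → Spec_quote_windows_arg_py arg (quote_windows_arg_py arg)

-- ===== LEMMAS AND PROOFS =====

-- the per-character view of a single-character replace
def relOne (o : Char) (new : List Char) (c : Char) : List Char :=
  if c = o then new else [c]

theorem go_singleton (o : Char) (new : List Char) :
    ∀ (l acc : List Char) (fuel : Nat), l.length ≤ fuel →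
      PySem.Chars.replace.go [o] new fuel l acc
        = acc.reverse ++ l.flatMap (relOne o new) := by
  intro l
  induction l with
  | nil =>
    intro acc fuel _
    cases fuel <;> simp [PySem.Chars.replace.go]
  | cons c t ih =>
    intro acc fuel h
    cases fuel with
    | zero => simp at h
    | succ f =>
      rw [PySem.Chars.replace.go]
      by_cases hco : c = o
      · subst hco
        have hp : [c].isPrefixOf (c :: t) = true := by simp [List.isPrefixOf]
        rw [if_pos hp]
        simp only [List.length_cons, List.length_nil, List.drop_succ_cons, List.drop_zero]
        simp only [List.length_cons] at h
        rw [ih _ f (by omega)]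
        simp [relOne]
      · have hp : [o].isPrefixOf (c :: t) = false := by
          simp [List.isPrefixOf]; exact fun hoc => hco hoc.symm
        rw [hp]
        simp only [Bool.false_eq_true, if_false]
        simp only [List.length_cons] at h
        rw [ih _ f (by omega)]
        simp [relOne, hco]

theorem replace_singleton (l : List Char) (o : Char) (new : List Char) :
    PySem.Chars.replace l [o] new = l.flatMap (relOne o new) := by
  rw [PySem.Chars.replace]
  simp only [List.isEmpty_cons, Bool.false_eq_true, if_false]
  have := go_singleton o new l [] l.length le_rfl
  simpa using this

-- composing two per-character rewrites is a per-character rewrite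
theorem flatMap_flatMap' (l : List Char) (f g : Char → List Char) :
    (l.flatMap f).flatMap g = l.flatMap (fun c => (f c).flatMap g) := by
  induction l with
  | nil => rfl
  | cons c t ih => simp [List.flatMap_cons, ih]

-- the seven sequential replaces collapse to the single table qaEsc
theorem chain_eq_flatMap (s : List Char) :
    PySem.Chars.replace
      (PySem.Chars.replace
        (PySem.Chars.replace
          (['^', '&', '|', '<', '>'].foldl
            (fun e ch => PySem.Chars.replace e [ch] ['^', ch]) s)
          ['('] ['^', '(']) [')'] ['^', ')']) ['"'] ['"', '"']
      = s.flatMap qaEsc := by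
  simp only [List.foldl_cons, List.foldl_nil]
  simp only [replace_singleton]
  simp only [flatMap_flatMap']
  apply List.flatMap_congr
  intro c _
  by_cases h1 : c = '^'; · subst h1; decide
  by_cases h2 : c = '&'; · subst h2; decide
  by_cases h3 : c = '|'; · subst h3; decide
  by_cases h4 : c = '<'; · subst h4; decide
  by_cases h5 : c = '>'; · subst h5; decide
  by_cases h6 : c = '('; · subst h6; decide
  by_cases h7 : c = ')'; · subst h7; decide
  by_cases h8 : c = '"'; · subst h8; decide
  simp [relOne, qaEsc, h1, h2, h3, h4, h5, h6, h7, h8]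

-- ===== VERDICT (by name: the statement is the Claim_ definition above) =====
theorem quote_windows_arg_py_spec : Claim_equal_quote_windows_arg_py := by
  intro arg _
  unfold Spec_quote_windows_arg_py quote_windows_arg_py quote_windows_arg_py_alt
  by_cases hg : qaGuard arg.toList
  · simp only [hg, if_true]
    rw [chain_eq_flatMap]
  · simp [hg]
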